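-- pv_equiv track=rewrite | github.com/nlongname/Project_Euler | 122.py | chain_list
-- ===== SOURCE A (Python) =====
-- def chain_list(goal:int=200):
--     cl = [[[]],[[1]]]
--     while goal >= len(cl):
--         next_num = len(cl)
--         min_paths = []
--         min_length = 0
--         for i in range(int(next_num/2),next_num):
--             for l in cl[i]:
--                 if (next_num - i) in l:
--                     if min_length == 0 or min_length > (len(l)+1):
--                         min_paths = [l + [next_num]]
--                         min_length = len(min_paths[0])
--                     elif min_length == len(l)+1:
--                         min_paths.append(l+[next_num])
--         cl.append(min_paths)
--     cl = [x[0] for x in cl[1:]]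
--     cl = [len(x)-1 for x in cl] #subtract one because they all include 1, which takes 0 multiplications
--     return sum(cl)
-- ===== SOURCE B (Python) =====
-- def chain_list(goal: int = 200):
--     # Forward propagation: instead of scanning i in [n//2, n) and testing (n - i) in l,
--     # each finalized chain pushes its successor candidates l + [n + e] (e in l) into a
--     # pending dict; finalizing n just takes the minimum-length pending candidates.
--     cand = {}
--     total = 0
--     for n in range(1, goal + 1):
--         if n == 1:
--             chains = [[1]]
--         else:
--             cs = cand.get(n, [])
--             m = min(len(c) for c in cs)
--             chains = [c for c in cs if len(c) == m]
--             total += m - 1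
--         for l in chains:
--             for e in l:
--                 t = n + e
--                 if t <= goal:
--                     cand.setdefault(t, []).append(l + [t])
--     return total
-- ===== Notes on version B (the rewrite author's own statement) =====
-- stated objective: alternative
-- what changed: A pulls candidates for each level by scanning all chains stored at the indices of the upper half below it and membership-testing the complementary element in each chain; B inverts the dataflow: each chain, when finalized at its level, pushes its successor candidates (the chain extended by level-plus-element, for each of its elements) into a pending dict keyed by target level, so finalizing a level is just a min-length filter of its pending list, with no predecessor scan and no membership test.
import Mathlib
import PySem

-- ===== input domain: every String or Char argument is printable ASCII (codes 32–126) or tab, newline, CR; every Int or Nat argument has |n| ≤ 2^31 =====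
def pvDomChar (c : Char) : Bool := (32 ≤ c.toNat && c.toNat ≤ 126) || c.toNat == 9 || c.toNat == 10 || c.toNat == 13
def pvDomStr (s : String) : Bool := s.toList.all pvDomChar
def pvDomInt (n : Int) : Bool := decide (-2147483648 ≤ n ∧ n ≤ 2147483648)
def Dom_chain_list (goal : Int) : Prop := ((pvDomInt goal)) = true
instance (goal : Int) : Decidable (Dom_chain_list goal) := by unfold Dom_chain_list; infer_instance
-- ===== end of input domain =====

-- B replaces A's backward scan (for each n, scan chains at i in [n//2,n) and membership-test
-- n-i) by forward propagation: each finalized chain pushes its successor candidates into a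
-- pending dict keyed by target level (objective: alternative); return values proved equal.


-- ===== PORT A =====
-- chains hold positive Python ints, so Nat is exact for their elements;
-- range(int(next_num/2), next_num): next_num ≥ 2 so int(next_num/2) = next_num // 2 = n / 2 on Nat,
-- and range(a,b) with a ≤ b is List.range' a (b - a) (exact, empty when b ≤ a).
-- One pass of A's inner double loop with the running (min_paths, min_length) state:
def chainStepA (cl : List (List (List Nat))) (n : Nat) : List (List Nat) × Nat :=
  (List.range' (n / 2) (n - n / 2)).foldl
    (fun s i =>
      (cl.getD i []).foldl
        (fun (s : List (List Nat) × Nat) l =>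
          if (n - i) ∈ l then
            if s.2 = 0 ∨ l.length + 1 < s.2 then ([l ++ [n]], l.length + 1)
            else if s.2 = l.length + 1 then (s.1 ++ [l ++ [n]], s.2)
            else s
          else s)
        s)
    ([], 0)

-- the 'while goal >= len(cl)' loop; each pass appends min_paths for next_num = len(cl)
def chainLoopA (goal : Int) (cl : List (List (List Nat))) : List (List (List Nat)) :=
  if _h : (cl.length : Int) ≤ goal then
    chainLoopA goal (cl ++ [(chainStepA cl cl.length).1])
  else cl
termination_by (goal + 1 - cl.length).toNat
decreasing_by
  simp only [List.length_append, List.length_cons, List.length_nil]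
  omega

def chain_list (goal : Int) : Int :=
  let cl := chainLoopA goal [[[]], [[1]]]
  -- cl = [x[0] for x in cl[1:]] : Python's x[0] raises on an empty x, which A's runs never hit
  -- (every stored min_paths list for n ≥ 1 is nonempty); headD [] is exact on all of A's runs.
  let cl2 := (cl.drop 1).map (fun x => x.headD [])
  -- cl = [len(x)-1 for x in cl]
  let cl3 := cl2.map (fun x => (x.length : Int) - 1)
  cl3.sum

-- ===== PORT B =====
-- min(len(c) for c in cs): Python's min of a nonempty sequence folds min over the tail
-- starting from the head (the [] case is unreachable in Source B's runs; 0 there).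
def pyMinLen (cs : List (List Nat)) : Nat :=
  match cs with
  | [] => 0
  | c :: rest => rest.foldl (fun a d => Nat.min a d.length) c.length

-- Source B's inner push loop 'for e in l: t = n + e; if t <= goal: cand.setdefault(t, []).append(l + [t])'
def genFrom (goal : Int) (n : Nat) (cand : PySem.Dict Nat (List (List Nat))) (l : List Nat) :
    PySem.Dict Nat (List (List Nat)) :=
  l.foldl (fun cand e =>
    if ((n + e : Nat) : Int) ≤ goal then
      cand.insert (n + e) (cand.getD (n + e) [] ++ [l ++ [n + e]])
    else cand) cand

-- one iteration of Source B's for-loop body on the state (cand, total)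
def stepB (goal : Int) (s : PySem.Dict Nat (List (List Nat)) × Int) (nI : Int) :
    PySem.Dict Nat (List (List Nat)) × Int :=
  let n := nI.toNat   -- n ∈ range(1, goal+1) is positive
  let ct : List (List Nat) × Int :=
    if n = 1 then ([[1]], s.2)
    else
      let cs := s.1.getD n []
      let m := pyMinLen cs
      (cs.filter (fun c => c.length = m), s.2 + ((m : Int) - 1))
  (ct.1.foldl (genFrom goal n) s.1, ct.2)

def chain_list_alt (goal : Int) : Int :=
  ((PySem.List.pyRange 1 (goal + 1) 1).foldl (stepB goal) (PySem.Dict.empty, 0)).2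

-- ===== PRECONDITION & SPEC =====
def Spec_chain_list (goal : Int) (out : Int) : Prop := out = chain_list_alt goal
instance (goal : Int) (out : Int) : Decidable (Spec_chain_list goal out) := by unfold Spec_chain_list; infer_instance

-- ===== CLAIM (what is proved, stated in full; the proofs are below) =====
def Claim_equal_chain_list : Prop := ∀ (goal : Int), Dom_chain_list goal → Spec_chain_list goal (chain_list goal)

-- ===== LEMMAS AND PROOFS =====

-- A's candidate list for level n, as one comprehension (proof-side characterisation)
def chainCands (cl : List (List (List Nat))) (n : Nat) : List (List Nat) :=
  (List.range' (n / 2) (n - n / 2)).flatMap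
    (fun i => ((cl.getD i []).filter (fun l => (n - i) ∈ l)).map (fun l => l ++ [n]))

-- the pending candidates for level m after levels 1..n have pushed (i ranges over [m/2, min(n+1,m)))
def candPart (cl : List (List (List Nat))) (m n : Nat) : List (List Nat) :=
  (List.range' (m / 2) (min (n + 1) m - m / 2)).flatMap
    (fun i => ((cl.getD i []).filter (fun l => (m - i) ∈ l)).map (fun l => l ++ [m]))

-- invariant of every chain stored at level n: distinct elements, all in [1, n]
def GoodAt (n : Nat) (l : List Nat) : Prop := l.Nodup ∧ ∀ e ∈ l, 1 ≤ e ∧ e ≤ n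

-- A's finished table
def clF (goal : Int) : List (List (List Nat)) := chainLoopA goal [[[]], [[1]]]

-- B's per-level summand list
def partialSum (goal : Int) (n : Nat) : Int :=
  ((List.range' 2 (n - 1)).map (fun k => (pyMinLen (chainCands (clF goal) k) : Int) - 1)).sum

-- folding min over lengths only decreases
lemma foldMin_le (C : List (List Nat)) : ∀ a : Nat,
    C.foldl (fun x c => Nat.min x c.length) a ≤ a := by
  induction C with
  | nil => intro a; simp
  | cons c C ih =>
    intro a
    exact le_trans (ih _) (Nat.min_le_left _ _)

-- the fold-min is attained (or equals the seed)
lemma foldMin_attained (C : List (List Nat)) : ∀ a : Nat,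
    C.foldl (fun x c => Nat.min x c.length) a = a ∨
    ∃ c ∈ C, c.length = C.foldl (fun x c => Nat.min x c.length) a := by
  induction C with
  | nil => intro a; left; rfl
  | cons c C ih =>
    intro a
    rcases ih (Nat.min a c.length) with h | ⟨d, hd, hlen⟩
    · simp only [List.foldl_cons, h]
      rcases Nat.le_total a c.length with hle | hle
      · left; exact Nat.min_eq_left hle
      · right; exact ⟨c, List.mem_cons_self, (Nat.min_eq_right hle).symm⟩
    · right; exact ⟨d, List.mem_cons_of_mem _ hd, hlen⟩

-- A's running-minimum fold, characterised
lemma foldA_inv (C : List (List Nat)) :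
    ∀ (mp : List (List Nat)) (ml : Nat), 0 < ml → (∀ c ∈ C, 0 < c.length) →
    C.foldl
      (fun (s : List (List Nat) × Nat) c =>
        if s.2 = 0 ∨ c.length < s.2 then ([c], c.length)
        else if s.2 = c.length then (s.1 ++ [c], s.2)
        else s)
      (mp, ml)
    = ((if C.foldl (fun x c => Nat.min x c.length) ml = ml then mp else []) ++
        C.filter (fun c => c.length = C.foldl (fun x c => Nat.min x c.length) ml),
       C.foldl (fun x c => Nat.min x c.length) ml) := by
  induction C with
  | nil => intro mp ml hml _; simp
  | cons c C ih =>
    intro mp ml hml hC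
    have hcpos : 0 < c.length := hC c List.mem_cons_self
    have hC' : ∀ d ∈ C, 0 < d.length := fun d hd => hC d (List.mem_cons_of_mem _ hd)
    have hne : ¬ ml = 0 := Nat.pos_iff_ne_zero.mp hml
    simp only [List.foldl_cons]
    by_cases h1 : c.length < ml
    · have hmin : Nat.min ml c.length = c.length := Nat.min_eq_right (Nat.le_of_lt h1)
      simp only [hne, false_or, if_pos h1, hmin]
      rw [ih [c] c.length hcpos hC']
      have hm : C.foldl (fun x c => Nat.min x c.length) c.length ≤ c.length := foldMin_le _ _
      have hMne : ¬ (List.foldl (fun x c => Nat.min x c.length) c.length C = ml) := by omega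
      simp only [if_neg hMne, List.filter_cons]
      by_cases hc : c.length = List.foldl (fun x c => Nat.min x c.length) c.length C
      · rw [if_pos hc.symm, if_pos (decide_eq_true hc)]
        simp
      · rw [if_neg (fun h => hc h.symm), if_neg (by simpa using hc)]
    · by_cases h2 : ml = c.length
      · have hmin : Nat.min ml c.length = ml := Nat.min_eq_left (Nat.le_of_eq h2)
        simp only [hne, false_or, if_neg h1, if_pos h2, hmin]
        rw [ih (mp ++ [c]) ml hml hC']
        have hm : C.foldl (fun x c => Nat.min x c.length) ml ≤ ml := foldMin_le _ _
        by_cases hM : C.foldl (fun x c => Nat.min x c.length) ml = ml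
        · simp only [hM, List.filter_cons]
          have hcl : (c.length = ml) := h2.symm
          simp [hcl, List.append_assoc]
        · simp only [if_neg hM, List.filter_cons]
          have hcl : ¬ (c.length = C.foldl (fun x c => Nat.min x c.length) ml) := by omega
          simp [hcl]
      · have h3 : ml < c.length := by omega
        have hmin : Nat.min ml c.length = ml := Nat.min_eq_left (Nat.le_of_lt h3)
        simp only [hne, false_or, if_neg h1, if_neg h2, hmin]
        rw [ih mp ml hml hC']
        have hm : C.foldl (fun x c => Nat.min x c.length) ml ≤ ml := foldMin_le _ _
        have hcl : ¬ (c.length = C.foldl (fun x c => Nat.min x c.length) ml) := by omega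
        simp [hcl]

-- fold over a flatMap = nested fold
lemma foldl_flatMap {α β σ : Type} (xs : List α) (f : α → List β) (g : σ → β → σ) (s : σ) :
    (xs.flatMap f).foldl g s = xs.foldl (fun s a => (f a).foldl g s) s := by
  induction xs generalizing s with
  | nil => rfl
  | cons x xs ih => simp [List.flatMap_cons, List.foldl_append, ih]

-- A's per-level pass equals collect-then-filter on chainCands
lemma stepA_eq (cl : List (List (List Nat))) (n : Nat) :
    chainStepA cl n
      = ((chainCands cl n).filter (fun c => c.length = pyMinLen (chainCands cl n)),
         pyMinLen (chainCands cl n)) := by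
  have hbody : chainStepA cl n
      = (chainCands cl n).foldl
          (fun (s : List (List Nat) × Nat) c =>
            if s.2 = 0 ∨ c.length < s.2 then ([c], c.length)
            else if s.2 = c.length then (s.1 ++ [c], s.2)
            else s)
          ([], 0) := by
    unfold chainStepA chainCands
    rw [foldl_flatMap]
    congr 1
    funext s i
    rw [List.foldl_map, List.foldl_filter]
    congr 1
    funext t l
    by_cases hmem : (n - i) ∈ l
    · simp [hmem]
    · simp [hmem]
  rw [hbody]
  have hpos : ∀ d ∈ chainCands cl n, 0 < d.length := by
    intro d hd
    unfold chainCands at hd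
    simp only [List.mem_flatMap, List.mem_map, List.mem_filter] at hd
    obtain ⟨i, _, l, _, rfl⟩ := hd
    simp
  cases hC : chainCands cl n with
  | nil => simp [pyMinLen]
  | cons c C =>
    rw [hC] at hpos
    have hclen : 0 < c.length := hpos c List.mem_cons_self
    have hC' : ∀ d ∈ C, 0 < d.length := fun d hd => hpos d (List.mem_cons_of_mem _ hd)
    simp only [List.foldl_cons]
    rw [if_pos (Or.inl trivial)]
    rw [foldA_inv C [c] c.length hclen hC']
    have hmlen : pyMinLen (c :: C) = C.foldl (fun x c => Nat.min x c.length) c.length := rfl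
    rw [hmlen]
    have hm : C.foldl (fun x c => Nat.min x c.length) c.length ≤ c.length := foldMin_le _ _
    simp only [List.filter_cons]
    by_cases hM : C.foldl (fun x c => Nat.min x c.length) c.length = c.length
    · rw [if_pos hM, if_pos (decide_eq_true hM.symm)]
      simp
    · have hne2 : ¬ (c.length = C.foldl (fun x c => Nat.min x c.length) c.length) :=
        fun h => hM h.symm
      rw [if_neg hM, if_neg (by simpa using hne2)]
      simp

-- the head of the min-filter has exactly the minimal length (0 when there is no candidate)
lemma headD_filter_len (C : List (List Nat)) :
    (((C.filter (fun c => c.length = pyMinLen C)).headD []).length : Int) = (pyMinLen C : Int) := by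
  cases hC : C with
  | nil => simp [pyMinLen]
  | cons c rest =>
    have hmlen : pyMinLen (c :: rest) = rest.foldl (fun x c => Nat.min x c.length) c.length := rfl
    have hatt : ∃ d ∈ c :: rest, d.length = pyMinLen (c :: rest) := by
      rcases foldMin_attained rest c.length with h | ⟨d, hd, hlen⟩
      · exact ⟨c, List.mem_cons_self, by rw [hmlen, h]⟩
      · exact ⟨d, List.mem_cons_of_mem _ hd, by rw [hmlen, ← hlen]⟩
    obtain ⟨d, hd, hlen⟩ := hatt
    have hdfil : d ∈ (c :: rest).filter (fun x => x.length = pyMinLen (c :: rest)) := by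
      apply List.mem_filter.mpr
      exact ⟨hd, decide_eq_true hlen⟩
    cases hfil : (c :: rest).filter (fun x => x.length = pyMinLen (c :: rest)) with
    | nil => rw [hfil] at hdfil; cases hdfil
    | cons h t =>
      have hh : h ∈ (c :: rest).filter (fun x => x.length = pyMinLen (c :: rest)) := by
        rw [hfil]; exact List.mem_cons_self
      have := (List.mem_filter.mp hh).2
      simp only [List.headD_cons]
      simpa using this

-- chainLoopA only appends
lemma loopA_getD_lt (goal : Int) (cl : List (List (List Nat))) (k : Nat) (hk : k < cl.length) :
    (chainLoopA goal cl).getD k [] = cl.getD k [] := by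
  rw [chainLoopA]
  split_ifs with h
  · rw [loopA_getD_lt goal (cl ++ [(chainStepA cl cl.length).1]) k
      (by simp only [List.length_append, List.length_cons, List.length_nil]; omega)]
    exact List.getD_append _ _ _ _ hk
  · rfl
termination_by (goal + 1 - cl.length).toNat
decreasing_by
  simp only [List.length_append, List.length_cons, List.length_nil]
  omega

lemma loopA_length (goal : Int) (cl : List (List (List Nat))) :
    (chainLoopA goal cl).length = if (cl.length : Int) ≤ goal then (goal + 1).toNat else cl.length := by
  rw [chainLoopA]
  split_ifs with h
  · rw [loopA_length goal (cl ++ [(chainStepA cl cl.length).1])]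
    simp only [List.length_append, List.length_cons, List.length_nil]
    split_ifs with h2 <;> omega
  · rfl
termination_by (goal + 1 - cl.length).toNat
decreasing_by
  simp only [List.length_append, List.length_cons, List.length_nil]
  omega

-- chainStepA only reads indices < n
lemma stepA_congr (cl cl' : List (List (List Nat))) (n : Nat)
    (h : ∀ i < n, cl.getD i [] = cl'.getD i []) : chainStepA cl n = chainStepA cl' n := by
  unfold chainStepA
  apply PySem.List.foldl_congr_mem
  intro acc i hi
  have hin : i < n := by
    have := (List.mem_range'_1.mp hi).2
    omega
  rw [h i hin]

-- every built entry of the loop result is its own step applied to the result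
lemma loopA_getD_built (goal : Int) (cl : List (List (List Nat))) (k : Nat)
    (hk : cl.length ≤ k) (hk2 : k < (chainLoopA goal cl).length) :
    (chainLoopA goal cl).getD k [] = (chainStepA (chainLoopA goal cl) k).1 := by
  by_cases h : (cl.length : Int) ≤ goal
  · rw [chainLoopA, dif_pos h] at hk2 ⊢
    rcases Nat.lt_or_ge k (cl ++ [(chainStepA cl cl.length).1]).length with hlt | hge
    · -- k = cl.length: the entry just appended
      have hk' : k = cl.length := by
        simp only [List.length_append, List.length_cons, List.length_nil] at hlt
        omega
      rw [loopA_getD_lt goal _ k hlt]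
      subst hk'
      have hgd : (cl ++ [(chainStepA cl cl.length).1]).getD cl.length []
          = (chainStepA cl cl.length).1 := by
        rw [List.getD_eq_getElem?_getD, List.getElem?_append_right (le_refl _)]
        simp
      rw [hgd]
      congr 1
      apply stepA_congr
      intro i hi
      rw [loopA_getD_lt goal _ i (by simp only [List.length_append, List.length_cons, List.length_nil]; omega)]
      exact (List.getD_append _ _ _ _ hi).symm
    · exact loopA_getD_built goal (cl ++ [(chainStepA cl cl.length).1]) k hge hk2
  · rw [chainLoopA, dif_neg h] at hk2
    omega
termination_by (goal + 1 - cl.length).toNat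
decreasing_by
  simp only [List.length_append, List.length_cons, List.length_nil]
  omega

-- chains stored at level n are Nodup with elements in [1, n]
lemma clF_good (goal : Int) : ∀ n : Nat, ∀ l ∈ (clF goal).getD n [], GoodAt n l := by
  intro n
  induction n using Nat.strong_induction_on with
  | _ n ih =>
    intro l hl
    by_cases hlen : n < (clF goal).length
    · match n, ih with
      | 0, _ =>
        rw [clF, loopA_getD_lt goal _ 0 (by simp)] at hl
        simp only [List.getD_cons_zero] at hl
        rcases List.mem_singleton.mp hl with rfl
        exact ⟨List.nodup_nil, by simp⟩
      | 1, _ =>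
        rw [clF, loopA_getD_lt goal _ 1 (by simp)] at hl
        simp only [List.getD_cons_succ, List.getD_cons_zero] at hl
        rcases List.mem_singleton.mp hl with rfl
        refine ⟨List.nodup_singleton 1, ?_⟩
        intro e he
        rcases List.mem_singleton.mp he with rfl
        omega
      | (k+2), ih =>
        rw [show clF goal = chainLoopA goal [[[]], [[1]]] from rfl,
          loopA_getD_built goal _ (k+2) (by simp) (by rw [clF] at hlen; exact hlen),
          ← clF, stepA_eq] at hl
        have hl2 := List.mem_filter.mp hl
        unfold chainCands at hl2
        have h := hl2.1
        simp only [List.mem_flatMap, List.mem_map, List.mem_filter] at h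
        obtain ⟨i, hi, l0, ⟨hl0, hmem⟩, rfl⟩ := h
        have hirange := List.mem_range'_1.mp hi
        have hilt : i < k + 2 := by omega
        obtain ⟨hnd, hbd⟩ := ih i hilt l0 hl0
        constructor
        · rw [List.nodup_append]
          refine ⟨hnd, List.nodup_singleton _, ?_⟩
          intro a ha b hb
          rcases List.mem_singleton.mp hb with rfl
          have := hbd _ ha
          omega
        · intro e he
          rcases List.mem_append.mp he with h | h
          · have := hbd _ h
            omega
          · rcases List.mem_singleton.mp h with rfl
            omega
    · rw [List.getD_eq_default _ _ (by omega)] at hl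
      cases hl

-- pushing one chain l (GoodAt n) updates exactly the pending lists of its successors
lemma push_one (goal : Int) (n : Nat) (l : List Nat) (hl : GoodAt n l)
    (cand : PySem.Dict Nat (List (List Nat))) (m : Nat) :
    (genFrom goal n cand l).getD m []
      = cand.getD m [] ++
        (if ((m : Int) ≤ goal ∧ n < m ∧ (m - n) ∈ l) then [l ++ [m]] else []) := by
  have aux : ∀ (s : List Nat) (cand : PySem.Dict Nat (List (List Nat))),
      s.Nodup → (∀ e ∈ s, 1 ≤ e) →
      (s.foldl (fun cand e =>
          if ((n + e : Nat) : Int) ≤ goal then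
            cand.insert (n + e) (cand.getD (n + e) [] ++ [l ++ [n + e]])
          else cand) cand).getD m []
        = cand.getD m [] ++
          (if ((m : Int) ≤ goal ∧ n < m ∧ (m - n) ∈ s) then [l ++ [m]] else []) := by
    intro s
    induction s with
    | nil => intro cand _ _; simp
    | cons e s' ihs =>
      intro cand hnd hbd
      have he1 : 1 ≤ e := hbd e List.mem_cons_self
      simp only [List.foldl_cons]
      by_cases hle : ((n + e : Nat) : Int) ≤ goal
      · rw [if_pos hle,
          ihs _ (List.Nodup.of_cons hnd) (fun x hx => hbd x (List.mem_cons_of_mem _ hx)),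
          PySem.Dict.getD_insert]
        by_cases hm : m = n + e
        · subst hm
          have hsub : n + e - n = e := by omega
          have hnotin : ¬ (n + e - n ∈ s') := by
            rw [hsub]; exact (List.nodup_cons.mp hnd).1
          rw [if_pos rfl, if_neg (fun h => hnotin h.2.2),
            if_pos ⟨hle, by omega, by rw [hsub]; exact List.mem_cons_self⟩]
          simp
        · rw [if_neg hm]
          congr 1
          have hiff : ((m : Int) ≤ goal ∧ n < m ∧ (m - n) ∈ s')
              ↔ ((m : Int) ≤ goal ∧ n < m ∧ (m - n) ∈ e :: s') := by
            constructor
            · rintro ⟨h1, h2, h3⟩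
              exact ⟨h1, h2, List.mem_cons_of_mem _ h3⟩
            · rintro ⟨h1, h2, h3⟩
              refine ⟨h1, h2, ?_⟩
              rcases List.mem_cons.mp h3 with h | h
              · exfalso; exact hm (by omega)
              · exact h
          rw [if_congr hiff rfl rfl]
      · rw [if_neg hle,
          ihs _ (List.Nodup.of_cons hnd) (fun x hx => hbd x (List.mem_cons_of_mem _ hx))]
        congr 1
        have hiff : ((m : Int) ≤ goal ∧ n < m ∧ (m - n) ∈ s')
            ↔ ((m : Int) ≤ goal ∧ n < m ∧ (m - n) ∈ e :: s') := by
          constructor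
          · rintro ⟨h1, h2, h3⟩
            exact ⟨h1, h2, List.mem_cons_of_mem _ h3⟩
          · rintro ⟨h1, h2, h3⟩
            refine ⟨h1, h2, ?_⟩
            rcases List.mem_cons.mp h3 with h | h
            · exfalso
              apply hle
              have : m = n + e := by omega
              rw [← this]; exact h1
            · exact h
        rw [if_congr hiff rfl rfl]
  exact aux l cand hl.1 (fun e he => (hl.2 e he).1)

-- pushing a whole level
lemma push_all (goal : Int) (n : Nat) (chains : List (List Nat))
    (hgood : ∀ l ∈ chains, GoodAt n l)
    (cand : PySem.Dict Nat (List (List Nat))) (m : Nat) :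
    (chains.foldl (genFrom goal n) cand).getD m []
      = cand.getD m [] ++
        (if ((m : Int) ≤ goal ∧ n < m) then
          (chains.filter (fun l => (m - n) ∈ l)).map (fun l => l ++ [m])
         else []) := by
  induction chains generalizing cand with
  | nil => simp
  | cons l ch ih =>
    simp only [List.foldl_cons]
    rw [ih (fun x hx => hgood x (List.mem_cons_of_mem _ hx)),
      push_one goal n l (hgood l List.mem_cons_self), List.filter_cons]
    by_cases hcond : ((m : Int) ≤ goal ∧ n < m)
    · by_cases hmem : (m - n) ∈ l
      · rw [if_pos ⟨hcond.1, hcond.2, hmem⟩, if_pos hcond, if_pos hcond,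
          if_pos (by simpa using hmem)]
        simp
      · rw [if_neg (fun h => hmem h.2.2), if_pos hcond, if_pos hcond,
          if_neg (by simpa using hmem)]
        simp
    · rw [if_neg (fun h => hcond ⟨h.1, h.2.1⟩), if_neg hcond, if_neg hcond]
      simp

-- the candPart recurrence
lemma candPart_succ (goal : Int) (m n : Nat) (hn : n < m)
    (hgood : ∀ l ∈ (clF goal).getD n [], GoodAt n l) :
    candPart (clF goal) m n
      = candPart (clF goal) m (n - 1) ++
        (((clF goal).getD n []).filter (fun l => (m - n) ∈ l)).map (fun l => l ++ [m]) := by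
  unfold candPart
  have hmin1 : min (n + 1) m = n + 1 := by omega
  have hmin2 : min (n - 1 + 1) m = n - 1 + 1 ∨ (n = 0 ∧ min (n - 1 + 1) m = min 1 m) := by
    rcases Nat.eq_zero_or_pos n with rfl | hp
    · right; exact ⟨rfl, rfl⟩
    · left; omega
  by_cases hhalf : m / 2 ≤ n
  · -- the range gains exactly the new index n
    have hcnt : n + 1 - m / 2 = (n - m / 2) + 1 := by omega
    rw [hmin1, hcnt, List.range'_concat]
    have hlast : m / 2 + 1 * (n - m / 2) = n := by omega
    rw [hlast, List.flatMap_append]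
    congr 1
    · -- the old range agrees
      rcases Nat.eq_zero_or_pos n with rfl | hp
      · have hm1 : m = 1 := by omega
        subst hm1
        have hR : (clF goal).getD 0 [] = [[]] := by
          rw [clF, loopA_getD_lt goal _ 0 (by simp)]
          rfl
        rw [List.getD_eq_getElem?_getD] at hR
        simp
        intro a ha
        rw [hR] at ha
        rcases List.mem_singleton.mp ha with rfl
        simp
      · have : min (n - 1 + 1) m - m / 2 = n - m / 2 := by omega
        rw [this]
    · simp
  · -- no new index: m > 2n, so (m - n) ∉ any chain at level n
    have hc1 : n + 1 - m / 2 = 0 := by omega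
    have hc2 : min (n - 1 + 1) m - m / 2 = 0 := by omega
    rw [hmin1, hc1, hc2]
    simp only [List.range'_zero, List.flatMap_nil, List.nil_append]
    have hfil : ((clF goal).getD n []).filter (fun l => decide ((m - n) ∈ l)) = [] := by
      apply List.filter_eq_nil_iff.mpr
      intro l hl hmem
      obtain ⟨_, hbd⟩ := hgood l hl
      have hmn : n < m - n := by omega
      have := hbd _ (by simpa using hmem)
      omega
    rw [hfil]
    simp

-- candPart is empty before any level has pushed
lemma candPart_zero (goal : Int) (m : Nat) : candPart (clF goal) m 0 = [] := by
  unfold candPart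
  match m with
  | 0 => rfl
  | 1 =>
    have hR : (clF goal).getD 0 [] = [[]] := by
      rw [clF, loopA_getD_lt goal _ 0 (by simp)]
      rfl
    rw [List.getD_eq_getElem?_getD] at hR
    simp
    intro a ha
    rw [hR] at ha
    rcases List.mem_singleton.mp ha with rfl
    simp
  | (k+2) =>
    rw [show min 1 (k + 2) - (k + 2) / 2 = 0 from by omega]
    simp

-- once every contributing level has pushed, the pending list is A's candidate list
lemma candPart_full (goal : Int) (m n : Nat) (h : m ≤ n + 1) :
    candPart (clF goal) m n = chainCands (clF goal) m := by
  unfold candPart chainCands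
  rw [show min (n + 1) m = m from by omega]

-- levels > n do not change the pending list of m ≤ n + 1
lemma candPart_stable (goal : Int) (m n : Nat) (h : m ≤ n + 1) :
    candPart (clF goal) m (n + 1) = candPart (clF goal) m n := by
  unfold candPart
  rw [show min (n + 1 + 1) m = m from by omega, show min (n + 1) m = m from by omega]

-- the table entry n+1 is the min-filter of the candidate list (n + 1 ≤ goal)
lemma clF_entry (goal : Int) (n : Nat) (hle : ((n + 1 : Nat) : Int) ≤ goal) :
    (clF goal).getD (n + 1) []
      = if n + 1 = 1 then [[1]]
        else (chainCands (clF goal) (n + 1)).filter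
          (fun c => c.length = pyMinLen (chainCands (clF goal) (n + 1))) := by
  have hlen : n + 1 < (clF goal).length := by
    rw [clF, loopA_length]
    simp only [List.length_cons, List.length_nil]
    split_ifs with h2 <;> omega
  by_cases hn1 : n + 1 = 1
  · rw [if_pos hn1, hn1, clF, loopA_getD_lt goal _ 1 (by simp)]
    rfl
  · rw [if_neg hn1, clF, loopA_getD_built goal _ (n + 1) (by simp; omega) (by rw [clF] at hlen; exact hlen),
      ← clF, stepA_eq]

-- partialSum recurrence
lemma partialSum_succ (goal : Int) (n : Nat) (hn : 1 ≤ n) :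
    partialSum goal (n + 1)
      = partialSum goal n + ((pyMinLen (chainCands (clF goal) (n + 1)) : Int) - 1) := by
  unfold partialSum
  rw [show n + 1 - 1 = (n - 1) + 1 from by omega, List.range'_concat,
    show 2 + 1 * (n - 1) = n + 1 from by omega, List.map_append, List.sum_append]
  simp

-- B's fold invariant
lemma B_inv (goal : Int) : ∀ n : Nat, (n : Int) ≤ goal →
    (∀ m : Nat,
      ((PySem.List.pyRange 1 ((n : Int) + 1) 1).foldl (stepB goal) (PySem.Dict.empty, 0)).1.getD m []
        = if (m : Int) ≤ goal then candPart (clF goal) m n else []) ∧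
    ((PySem.List.pyRange 1 ((n : Int) + 1) 1).foldl (stepB goal) (PySem.Dict.empty, 0)).2
      = partialSum goal n := by
  intro n
  induction n with
  | zero =>
    intro _
    rw [PySem.List.pyRange_one_eq_nil (by norm_num)]
    constructor
    · intro m
      rw [candPart_zero]
      simp [PySem.Dict.getD_empty]
    · simp [partialSum]
  | succ n ihn =>
    intro hle
    have hle' : (n : Int) ≤ goal := by push_cast at hle ⊢; omega
    obtain ⟨ihc, iht⟩ := ihn hle'
    have hsplit : PySem.List.pyRange 1 ((↑(n + 1) : Int) + 1) 1
        = PySem.List.pyRange 1 ((n : Int) + 1) 1 ++ [(n : Int) + 1] := by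
      rw [PySem.List.pyRange_one_append 1 ((n : Int) + 1) ((↑(n + 1) : Int) + 1)
        (by omega) (by push_cast; omega)]
      congr 1
      rw [PySem.List.pyRange_one_cons (by push_cast; omega),
        PySem.List.pyRange_one_eq_nil (by push_cast; omega)]
    rw [hsplit, List.foldl_append, List.foldl_cons, List.foldl_nil]
    have htoNat : ((n : Int) + 1).toNat = n + 1 := by omega
    have hcast : ((n + 1 : Nat) : Int) ≤ goal := by push_cast at hle ⊢; omega
    -- evaluate the step at level n + 1
    have hstep : ∀ (cand : PySem.Dict Nat (List (List Nat))) (tot : Int),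
        cand.getD (n + 1) [] = (if ((n + 1 : Nat) : Int) ≤ goal then candPart (clF goal) (n + 1) n else []) →
        stepB goal (cand, tot) ((n : Int) + 1)
          = (((clF goal).getD (n + 1) []).foldl (genFrom goal (n + 1)) cand,
             tot + (if n + 1 = 1 then 0 else (pyMinLen (chainCands (clF goal) (n + 1)) : Int) - 1)) := by
      intro cand tot hcand
      rw [if_pos hcast, candPart_full goal (n + 1) n (le_refl _)] at hcand
      unfold stepB
      simp only [htoNat]
      by_cases hn1 : n + 1 = 1
      · rw [if_pos hn1, clF_entry goal n hcast, if_pos hn1, if_pos hn1]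
        simp
      · rw [if_neg hn1, clF_entry goal n hcast, if_neg hn1, if_neg hn1]
        simp only [hcand]
    rw [hstep _ _ (ihc (n + 1))]
    constructor
    · intro m
      rw [push_all goal (n + 1) _ (clF_good goal (n + 1)) _ m, ihc m]
      by_cases hm : (m : Int) ≤ goal
      · rw [if_pos hm, if_pos hm]
        by_cases hnm : n + 1 < m
        · rw [if_pos ⟨hm, hnm⟩,
            candPart_succ goal m (n + 1) hnm (clF_good goal (n + 1))]
          rfl
        · rw [if_neg (fun h => hnm h.2), candPart_stable goal m n (by omega)]
          simp
      · rw [if_neg hm, if_neg hm, if_neg (fun h => hm h.1)]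
        simp
    · simp only [iht]
      by_cases hn1 : n + 1 = 1
      · rw [if_pos hn1]
        have hn0 : n = 0 := by omega
        subst hn0
        simp [partialSum]
      · rw [if_neg hn1, partialSum_succ goal n (by omega)]

-- dropping the head is indexing from 1
lemma self_eq_map_getD_range {α : Type} (l : List α) (d : α) :
    l = (List.range l.length).map (fun k => l.getD k d) := by
  induction l with
  | nil => simp
  | cons x xs ih =>
    rw [List.length_cons, List.range_succ_eq_map, List.map_cons, List.map_map]
    refine congrArg₂ List.cons rfl ?_
    conv_lhs => rw [ih]
    apply List.map_congr_left
    intro k _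
    simp

lemma drop_one_eq_map_getD {α : Type} (l : List α) (d : α) :
    l.drop 1 = (List.range' 1 (l.length - 1)).map (fun k => l.getD k d) := by
  cases l with
  | nil => simp
  | cons x xs =>
    simp only [List.drop_one, List.tail_cons, List.length_cons, Nat.add_sub_cancel]
    rw [List.range'_eq_map_range, List.map_map]
    conv_lhs => rw [self_eq_map_getD_range xs d]
    apply List.map_congr_left
    intro k _
    simp [Nat.add_comm 1 k]

-- A's final sum equals B's accumulated total
lemma A_sum (goal : Int) (hg : 1 ≤ goal) :
    ((((clF goal).drop 1).map (fun x => x.headD [])).map (fun x => (x.length : Int) - 1)).sum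
      = partialSum goal goal.toNat := by
  have hlen : (clF goal).length = goal.toNat + 1 := by
    rw [clF, loopA_length]
    simp only [List.length_cons, List.length_nil]
    split_ifs with h2 <;> omega
  rw [drop_one_eq_map_getD (clF goal) [], hlen]
  simp only [Nat.add_sub_cancel, List.map_map]
  rw [show goal.toNat = (goal.toNat - 1) + 1 from by omega, List.range'_succ,
    List.map_cons, List.sum_cons]
  have h1 : (clF goal).getD 1 [] = [[1]] := by
    rw [clF, loopA_getD_lt goal _ 1 (by simp)]
    rfl
  have hcong : ∀ k ∈ List.range' 2 (goal.toNat - 1),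
      ((fun x => (x.length : Int) - 1) ∘ (fun x => x.headD []) ∘ fun k => (clF goal).getD k []) k
        = (fun k => (pyMinLen (chainCands (clF goal) k) : Int) - 1) k := by
    intro k hk
    have hkr := List.mem_range'_1.mp hk
    have hbuilt : (clF goal).getD k []
        = (chainCands (clF goal) k).filter
            (fun c => c.length = pyMinLen (chainCands (clF goal) k)) := by
      rw [show k = (k - 1) + 1 from by omega] at *
      rw [clF_entry goal (k - 1) (by omega), if_neg (by omega)]
    simp only [Function.comp_apply, hbuilt]
    rw [headD_filter_len]
  rw [List.map_congr_left hcong]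
  simp only [Function.comp_apply, h1]
  simp [partialSum]

-- ===== VERDICT (by name: the statement is the Claim_ definition above) =====
theorem chain_list_spec : Claim_equal_chain_list := by
  intro goal _
  unfold Spec_chain_list chain_list chain_list_alt
  by_cases hg : 1 ≤ goal
  · have hcast : ((goal.toNat : Nat) : Int) = goal := Int.toNat_of_nonneg (by omega)
    have hB := (B_inv goal goal.toNat (by omega)).2
    rw [hcast] at hB
    rw [hB, ← clF, A_sum goal hg]
  · rw [show chainLoopA goal [[[]], [[1]]] = [[[]], [[1]]] from by
        rw [chainLoopA, dif_neg (by simp; omega)],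
      PySem.List.pyRange_one_eq_nil (by omega)]
    simp
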